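-- pv_equiv track=rewrite | github.com/eruditorium/advent_of_code | advent_of_code/2015/day01/day01.py | part1
-- ===== SOURCE A (Python) =====
-- def part1(input):
--     """Solve part 1."""
--     floor = 0
--     for letter in input:
--
--         if letter == '(':
--             floor += 1
--         else:
--             floor -= 1
--
--     return floor
-- ===== SOURCE B (Python) =====
-- def part1(input):
--     """Solve part 1."""
--     return 2 * input.count('(') - len(input)
-- ===== Notes on version B (the rewrite author's own statement) =====
-- stated objective: simpler
-- what changed: Replaces the per-character branching loop with the closed form 2*count('(')-len, since each open paren adds 1 and every other character subtracts 1.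
import Mathlib
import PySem

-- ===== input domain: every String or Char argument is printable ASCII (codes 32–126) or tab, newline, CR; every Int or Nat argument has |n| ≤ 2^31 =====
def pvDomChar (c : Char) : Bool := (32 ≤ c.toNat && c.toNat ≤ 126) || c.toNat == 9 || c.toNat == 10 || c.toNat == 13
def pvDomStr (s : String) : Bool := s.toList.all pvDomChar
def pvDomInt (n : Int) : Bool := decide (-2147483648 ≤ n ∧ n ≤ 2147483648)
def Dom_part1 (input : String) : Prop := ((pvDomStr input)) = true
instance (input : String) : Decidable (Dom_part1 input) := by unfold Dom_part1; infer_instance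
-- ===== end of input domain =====

-- B replaces A's per-character branching loop with the closed form 2*count('(') - len (objective: simpler).


-- ===== PORT A =====
def part1 (input : String) : Int :=
  input.toList.foldl (fun floor letter => if letter == '(' then floor + 1 else floor - 1) 0

-- ===== PORT B =====
def part1_alt (input : String) : Int :=
  2 * (PySem.Str.count input "(" : Int) - PySem.Str.len input

-- ===== PRECONDITION & SPEC =====
def Spec_part1 (input : String) (out : Int) : Prop := out = part1_alt input
instance (input : String) (out : Int) : Decidable (Spec_part1 input out) := by unfold Spec_part1; infer_instance

-- ===== CLAIM (what is proved, stated in full; the proofs are below) =====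
def Claim_equal_part1 : Prop := ∀ (input : String), Dom_part1 input → Spec_part1 input (part1 input)

-- ===== LEMMAS AND PROOFS =====

-- counting a one-character pattern with Python's substring scan is List.count
lemma count_go_singleton (c : Char) (l : List Char) (fuel acc : Nat) (h : l.length ≤ fuel) :
    PySem.Chars.count.go [c] fuel l acc = acc + l.count c := by
  induction l generalizing fuel acc with
  | nil =>
    cases fuel with
    | zero => simp [PySem.Chars.count.go]
    | succ f => simp [PySem.Chars.count.go]
  | cons hd t ih =>
    cases fuel with
    | zero => simp at h
    | succ f =>
      have hf : t.length ≤ f := by simpa using h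
      by_cases hc : hd = c
      · subst hc
        simp [PySem.Chars.count.go, List.isPrefixOf, ih _ _ hf]
        omega
      · have : ([c].isPrefixOf (hd :: t)) = false := by
          simp [List.isPrefixOf]; exact fun e => hc e.symm
        simp [PySem.Chars.count.go, this, ih _ _ hf, hc]

lemma count_singleton (c : Char) (l : List Char) :
    PySem.Chars.count l [c] = l.count c := by
  simp [PySem.Chars.count, count_go_singleton c l l.length 0 le_rfl]

-- A's loop equals the closed form on any character list
lemma fold_eq_closed (l : List Char) (a : Int) :
    l.foldl (fun floor letter => if letter == '(' then floor + 1 else floor - 1) a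
      = a + 2 * (l.count '(' : Int) - l.length := by
  induction l generalizing a with
  | nil => simp
  | cons hd t ih =>
    rw [List.foldl_cons, ih]
    by_cases hc : hd = '(' <;> simp [hc, List.count_cons] <;> push_cast <;> ring

-- ===== VERDICT (by name: the statement is the Claim_ definition above) =====
theorem part1_spec : Claim_equal_part1 := by
  intro input _
  show part1 input = part1_alt input
  unfold part1 part1_alt
  rw [fold_eq_closed, PySem.Str.count_eq, PySem.Str.len_eq]
  simp [count_singleton]
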